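-- pv_equiv track=rewrite | github.com/tn3w/is-crawler | is_crawler/detection.py | _bare_compat
-- ===== SOURCE A (Python) =====
-- _COMPAT_REJECT = ("windows", "mac", "linux", "msie", "konqueror")
--
-- def _bare_compat(ua: str) -> bool:
--     low = ua.lower()
--     i = 0
--     while (i := low.find("(compatible;", i)) != -1:
--         close = low.find(")", i)
--         if close == -1:
--             return False
--         if not any(r in low[i : close + 1] for r in _COMPAT_REJECT):
--             return True
--         i = close
--     return False
-- ===== SOURCE B (Python) =====
-- _COMPAT_REJECT = ("windows", "mac", "linux", "msie", "konqueror")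
--
-- def _bare_compat(ua: str) -> bool:
--     parts = ua.lower().split(")")
--     for part in parts[:-1]:
--         j = part.find("(compatible;")
--         if j != -1 and not any(r in part[j:] + ")" for r in _COMPAT_REJECT):
--             return True
--     return False
-- ===== Notes on version B (the rewrite author's own statement) =====
-- stated objective: alternative
-- what changed: Replaces the index-based while loop (repeated find-from-index with segment re-slicing) by splitting the lowered string once at every closing parenthesis and making a single linear pass over the resulting parts, testing each part's first compat-token occurrence.
import Mathlib
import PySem

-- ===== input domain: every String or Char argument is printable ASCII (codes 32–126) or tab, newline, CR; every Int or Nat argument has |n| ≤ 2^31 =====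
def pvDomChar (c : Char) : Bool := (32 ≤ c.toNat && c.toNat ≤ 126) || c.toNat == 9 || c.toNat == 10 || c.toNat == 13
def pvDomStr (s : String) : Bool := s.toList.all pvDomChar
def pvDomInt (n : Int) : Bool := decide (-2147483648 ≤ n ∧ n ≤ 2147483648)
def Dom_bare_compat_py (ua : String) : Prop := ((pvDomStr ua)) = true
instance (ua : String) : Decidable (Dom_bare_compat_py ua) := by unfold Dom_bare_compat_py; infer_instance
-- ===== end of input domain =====

-- B replaces A's index-based find/reslice while-loop by one split at the closing parens plus a single pass over the parts (alternative decomposition, same cost).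

-- the "(compatible;" token and the reject keywords, as char lists (shared module constants)
def pvPat : List Char := "(compatible;".toList
def pvRejects : List (List Char) := ["windows".toList, "mac".toList, "linux".toList, "msie".toList, "konqueror".toList]

-- ===== PORT A =====
-- the while loop of A: i is the current search start, fuel bounds the iteration count (each
-- iteration strictly increases i below low.length, so low.length + 1 iterations always suffice)
def pvALoop (low : List Char) (i : Nat) (fuel : Nat) : Bool :=
  match fuel with
  | 0 => false
  | fuel + 1 =>
    let f := PySem.Chars.findFrom low pvPat (i : Int)
    if f = -1 then false
    else
      let close := PySem.Chars.findFrom low [')'] f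
      if close = -1 then false
      else if !(pvRejects.any (fun r => PySem.Chars.isIn r (PySem.Chars.slice low (some f) (some (close + 1))))) then true
      else pvALoop low close.toNat fuel

def bare_compat_py (ua : String) : Bool :=
  let low := PySem.Chars.lower ua.toList
  pvALoop low 0 (low.length + 1)

-- ===== PORT B =====
-- B's per-part test: first "(compatible;" in the part, if any, with no reject keyword after it
def pvClean (part : List Char) : Bool :=
  let j := PySem.Chars.find part pvPat
  j != -1 && !(pvRejects.any (fun r => PySem.Chars.isIn r (PySem.Chars.slice part (some j) none ++ [')'])))

def bare_compat_py_alt (ua : String) : Bool :=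
  let parts := PySem.Chars.splitOn (PySem.Chars.lower ua.toList) [')']
  (PySem.List.slice parts none (some (-1))).any pvClean

-- ===== PRECONDITION & SPEC =====
def Spec_bare_compat_py (ua : String) (out : Bool) : Prop := out = bare_compat_py_alt ua
instance (ua : String) (out : Bool) : Decidable (Spec_bare_compat_py ua out) := by unfold Spec_bare_compat_py; infer_instance

-- ===== CLAIM (what is proved, stated in full; the proofs are below) =====
def Claim_equal_bare_compat_py : Prop := ∀ (ua : String), Dom_bare_compat_py ua → Spec_bare_compat_py ua (bare_compat_py ua)

-- ===== LEMMAS AND PROOFS =====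

-- proof-side abbreviations
def pvCleanSeg (seg : List Char) : Bool := !(pvRejects.any (fun r => PySem.Chars.isIn r seg))

-- structural model of low.split(")") : split at each ')'
def pvSplit : List Char → List (List Char)
  | [] => [[]]
  | a :: t => if a = ')' then [] :: pvSplit t else (pvSplit t).modifyHead (fun h => a :: h)

def pvBany (s : List Char) : Bool := ((pvSplit s).dropLast).any pvClean

-- generic helpers
theorem pvSingle {x : Char} {L : List Char} : [x] <+: L ↔ L[0]? = some x := by
  cases L with
  | nil => simp
  | cons a t => simp [List.cons_prefix_cons, eq_comm]

theorem pvInfix_iff {L M : List Char} : L <:+: M ↔ ∃ j, L <+: M.drop j := by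
  constructor
  · rintro ⟨p, q, rfl⟩
    exact ⟨p.length, by simp⟩
  · rintro ⟨j, h⟩
    exact h.isInfix.trans (List.drop_suffix j M).isInfix

theorem pvPrefGet {p t : List Char} (h : p <+: t) {i : Nat} (hi : i < p.length) :
    t[i]? = some (p[i]'hi) := by
  have h2 : i < t.length := lt_of_lt_of_le hi h.length_le
  rw [List.getElem?_eq_getElem h2]
  exact congrArg some (h.getElem hi).symm

theorem pvFindEq {t pat : List Char} {k : Nat} (hk : pat <+: t.drop k)
    (hmin : ∀ i < k, ¬ pat <+: t.drop i) : PySem.Chars.find t pat = (k : Int) := by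
  have hinf : pat <:+: t := pvInfix_iff.mpr ⟨k, hk⟩
  have hne : PySem.Chars.find t pat ≠ -1 := by
    rw [Ne, PySem.Chars.find_eq_neg_one_iff]
    intro h; exact h hinf
  have hge : 0 ≤ PySem.Chars.find t pat := by
    have := PySem.Chars.neg_one_le_find t pat; omega
  obtain ⟨hp, hm⟩ := PySem.Chars.find_spec hge
  have hgk : (PySem.Chars.find t pat).toNat = k := by
    rcases lt_trichotomy (PySem.Chars.find t pat).toNat k with h|h|h
    · exact absurd hp (hmin _ h)
    · exact h
    · exact absurd hk (hm k h)
  omega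

theorem pvFindSpecNat {t pat : List Char} {k : Nat} (h : PySem.Chars.find t pat = (k:Int)) :
    pat <+: t.drop k ∧ ∀ i < k, ¬ pat <+: t.drop i := by
  have hge : 0 ≤ PySem.Chars.find t pat := by rw [h]; exact Int.natCast_nonneg k
  obtain ⟨hp, hm⟩ := PySem.Chars.find_spec hge
  rw [h] at hp hm
  simp only [Int.toNat_natCast] at hp hm
  exact ⟨hp, hm⟩

theorem pvFindDrop {s pat : List Char} {fn d : Nat} (hf : PySem.Chars.find s pat = (fn:Int))
    (hd : d ≤ fn) : PySem.Chars.find (s.drop d) pat = ((fn - d : Nat) : Int) := by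
  obtain ⟨hp, hm⟩ := pvFindSpecNat hf
  apply pvFindEq
  · rw [List.drop_drop, show d + (fn - d) = fn from by omega]
    exact hp
  · intro i hi hcon
    rw [List.drop_drop] at hcon
    exact hm (d + i) (by omega) hcon

-- pvSplit structure
theorem pvSplit_ne_nil (s : List Char) : pvSplit s ≠ [] := by
  induction s with
  | nil => simp [pvSplit]
  | cons a t ih =>
    simp only [pvSplit]
    split
    · simp
    · intro h
      cases hpt : pvSplit t with
      | nil => exact ih hpt
      | cons x xs => rw [hpt] at h; simp [List.modifyHead] at h

theorem pvSplit_noSep {s : List Char} (h : ')' ∉ s) : pvSplit s = [s] := by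
  induction s with
  | nil => rfl
  | cons a t ih =>
    have ha : a ≠ ')' := fun hh => h (by simp [hh])
    simp only [pvSplit, if_neg ha]
    rw [ih (fun hm => h (List.mem_cons_of_mem _ hm))]
    simp [List.modifyHead]

theorem pvSplit_decomp {a b : List Char} (h : ')' ∉ a) :
    pvSplit (a ++ ')' :: b) = a :: pvSplit b := by
  induction a with
  | nil => simp [pvSplit]
  | cons x xs ih =>
    have hx : x ≠ ')' := fun hh => h (by simp [hh])
    simp only [List.cons_append, pvSplit, if_neg hx]
    rw [ih (fun hm => h (List.mem_cons_of_mem _ hm))]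
    simp [List.modifyHead]

-- bridge from PySem's splitOn to pvSplit
theorem pvGo_spec : ∀ (fuel : Nat) (l cur : List Char) (acc : List (List Char)), l.length ≤ fuel →
    PySem.Chars.splitOn.go [')'] fuel l cur acc
      = acc.reverse ++ (pvSplit l).modifyHead (fun h => cur.reverse ++ h) := by
  intro fuel
  induction fuel with
  | zero =>
    intro l cur acc hl
    have hnil : l = [] := List.length_eq_zero_iff.mp (Nat.le_zero.mp hl)
    subst hnil
    rw [PySem.Chars.splitOn.go]
    simp [pvSplit, List.modifyHead]
  | succ f ih =>
    intro l cur acc hl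
    cases l with
    | nil =>
      rw [PySem.Chars.splitOn.go] <;> try omega
      simp [pvSplit, List.modifyHead]
    | cons c rest =>
      rw [PySem.Chars.splitOn.go]
      by_cases hc : c = ')'
      · rw [if_pos (by simp [List.isPrefixOf, hc])]
        rw [ih _ _ _ (by simpa using Nat.le_of_succ_le_succ (by simpa using hl))]
        subst hc
        cases hpt : pvSplit rest with
        | nil => exact absurd hpt (pvSplit_ne_nil rest)
        | cons y ys => simp [pvSplit, hpt, List.modifyHead]
      · rw [if_neg (by simp [List.isPrefixOf]; exact fun h => hc h.symm)]
        rw [ih _ _ _ (by simp at hl; omega)]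
        simp only [pvSplit, if_neg hc]
        cases hpt : pvSplit rest with
        | nil => exact absurd hpt (pvSplit_ne_nil rest)
        | cons y ys => simp [List.modifyHead]

theorem pvSplitOn_eq (s : List Char) : PySem.Chars.splitOn s [')'] = pvSplit s := by
  rw [PySem.Chars.splitOn, pvGo_spec (s.length + 1) s [] [] (by omega)]
  cases hpt : pvSplit s with
  | nil => exact absurd hpt (pvSplit_ne_nil s)
  | cons y ys => simp [List.modifyHead]

-- pvBany recurrences
theorem pvBany_noSep {s : List Char} (h : PySem.Chars.find s [')'] = -1) : pvBany s = false := by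
  have hninf : ¬ [')'] <:+: s := (PySem.Chars.find_eq_neg_one_iff s [')']).mp h
  have hn : ')' ∉ s := by
    intro hm
    obtain ⟨p, q, hpq⟩ := List.append_of_mem hm
    exact hninf ⟨p, q, by rw [hpq]; simp⟩
  simp [pvBany, pvSplit_noSep hn]

theorem pvSep_at {s : List Char} {mn : Nat} (h : PySem.Chars.find s [')'] = (mn:Int)) :
    s.drop mn = ')' :: s.drop (mn+1) := by
  obtain ⟨hp, _⟩ := pvFindSpecNat h
  have h0 : (s.drop mn)[0]? = some ')' := pvSingle.mp hp
  cases hd : s.drop mn with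
  | nil => rw [hd] at h0; simp at h0
  | cons x t =>
    rw [hd] at h0
    simp only [List.getElem?_cons_zero, Option.some.injEq] at h0
    have ht : t = s.drop (mn+1) := by
      have h5 : (s.drop mn).tail = s.drop (mn+1) := List.tail_drop
      rw [hd] at h5
      simpa using h5
    rw [h0, ht]

theorem pvBany_step {s : List Char} {mn : Nat} (h : PySem.Chars.find s [')'] = (mn:Int)) :
    pvBany s = (pvClean (s.take mn) || pvBany (s.drop (mn+1))) := by
  obtain ⟨hp, hm⟩ := pvFindSpecNat h
  have htake : ')' ∉ s.take mn := by
    intro hmem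
    rw [List.mem_take_iff_getElem] at hmem
    obtain ⟨j, hj, hje⟩ := hmem
    apply hm j (by omega)
    have hjl : j < s.length := by omega
    rw [pvSingle, List.getElem?_drop]
    simp only [Nat.add_zero, List.getElem?_eq_getElem hjl, hje]
  have hdecomp : s = s.take mn ++ ')' :: s.drop (mn+1) := by
    conv_lhs => rw [← List.take_append_drop mn s]
    rw [pvSep_at h]
  conv_lhs => rw [hdecomp]
  simp [pvBany, pvSplit_decomp htake, List.dropLast_cons_of_ne_nil (pvSplit_ne_nil _)]

theorem pvClean_nil : pvClean [] = false := by decide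

theorem pvBany_cons_sep (t : List Char) : pvBany (')' :: t) = pvBany t := by
  have hps : pvSplit (')' :: t) = [] :: pvSplit t := by simp [pvSplit]
  show (pvSplit (')' :: t)).dropLast.any pvClean = _
  rw [hps, List.dropLast_cons_of_ne_nil (pvSplit_ne_nil t)]
  simp [pvClean_nil, pvBany]

theorem pvPatLen : pvPat.length = 12 := by decide

theorem pvClean_take_false {s : List Char} {m : Nat}
    (hmin : ∀ i < m, ¬ pvPat <+: s.drop i) : pvClean (s.take m) = false := by
  have hfind : PySem.Chars.find (s.take m) pvPat = -1 := by
    rw [PySem.Chars.find_eq_neg_one_iff]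
    intro hinf
    obtain ⟨j, hj⟩ := pvInfix_iff.mp hinf
    have hlen := hj.length_le
    rw [List.length_drop, List.length_take, pvPatLen] at hlen
    have hjm : j < m := by omega
    apply hmin j hjm
    rw [List.drop_take] at hj
    exact hj.trans (List.take_prefix _ _)
  simp [pvClean, hfind]

theorem pvClean_at_occ {s : List Char} {f c : Nat} (hpre : pvPat <+: s.drop f)
    (hminf : ∀ i < f, ¬ pvPat <+: s.drop i)
    (hc : PySem.Chars.find (s.drop f) [')'] = (c:Int)) :
    pvClean (s.take (f+c)) = pvCleanSeg ((s.drop f).take (c+1)) := by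
  obtain ⟨hcp, hcm⟩ := pvFindSpecNat hc
  have hsome : (s.drop f)[c]? = some ')' := by
    have h0 := pvSingle.mp hcp
    rw [List.getElem?_drop] at h0
    simpa using h0
  have hc12 : 12 ≤ c := by
    by_contra hlt
    push_neg at hlt
    have h2 : (s.drop f)[c]? = some (pvPat[c]'(by rw [pvPatLen]; omega)) :=
      pvPrefGet hpre (by rw [pvPatLen]; omega)
    rw [hsome] at h2
    have h3 : ∀ i (hi : i < pvPat.length), pvPat[i] ≠ ')' := by decide
    exact h3 c (by rw [pvPatLen]; omega) (by injection h2 with h4; exact h4.symm)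
  have hfind : PySem.Chars.find (s.take (f+c)) pvPat = (f:Int) := by
    apply pvFindEq
    · rw [List.drop_take, show f + c - f = c from by omega]
      obtain ⟨r, hr⟩ := hpre
      rw [← hr, List.take_append, List.take_of_length_le (by rw [pvPatLen]; omega)]
      exact List.prefix_append _ _
    · intro i hi hcon
      rw [List.drop_take] at hcon
      exact hminf i hi (hcon.trans (List.take_prefix _ _))
  have hseg : PySem.Chars.slice (s.take (f+c)) (some (f:Int)) none ++ [')']
      = (s.drop f).take (c+1) := by
    rw [PySem.Chars.slice_eq_listSlice, PySem.List.slice_from_natCast,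
      List.drop_take, show f + c - f = c from by omega, List.take_succ, hsome]
    rfl
  show (PySem.Chars.find (s.take (f+c)) pvPat != -1 &&
    !(pvRejects.any (fun r => PySem.Chars.isIn r
      (PySem.Chars.slice (s.take (f+c)) (some (PySem.Chars.find (s.take (f+c)) pvPat)) none ++ [')'])))) = _
  rw [hfind, hseg]
  simp [pvCleanSeg]

-- B-side master lemma: pvBany follows A's step relation
theorem pvBmain : ∀ (n : Nat) (s : List Char), s.length ≤ n →
    (PySem.Chars.find s pvPat = -1 → pvBany s = false) ∧
    (∀ fn : Nat, PySem.Chars.find s pvPat = (fn:Int) →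
      (PySem.Chars.find (s.drop fn) [')'] = -1 → pvBany s = false) ∧
      (∀ cn : Nat, PySem.Chars.find (s.drop fn) [')'] = (cn:Int) →
        (pvCleanSeg ((s.drop fn).take (cn+1)) = true → pvBany s = true) ∧
        (pvCleanSeg ((s.drop fn).take (cn+1)) = false →
          pvBany s = pvBany (s.drop (fn+cn))))) := by
  intro n
  induction n with
  | zero =>
    intro s hs
    have hnil : s = [] := List.length_eq_zero_iff.mp (Nat.le_zero.mp hs)
    subst hnil
    refine ⟨fun _ => by decide, fun fn hf => ?_⟩
    have : PySem.Chars.find ([] : List Char) pvPat = -1 := by decide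
    rw [this] at hf
    exact absurd hf (by omega)
  | succ n ih =>
    intro s hs
    constructor
    · -- no occurrence anywhere
      intro hf
      have hnocc : ∀ j, ¬ pvPat <+: s.drop j := by
        intro j hj
        exact ((PySem.Chars.find_eq_neg_one_iff s pvPat).mp hf) (pvInfix_iff.mpr ⟨j, hj⟩)
      rcases hm' : PySem.Chars.find s [')'] with _
      case _ =>
        have hge := PySem.Chars.neg_one_le_find s [')']
        rcases Int.le_iff_lt_or_eq.mp hge with hlt | heq
        · -- find ≥ 0
          have h0 : 0 ≤ PySem.Chars.find s [')'] := by omega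
          obtain ⟨mn, hmn⟩ := Int.eq_ofNat_of_zero_le h0
          rw [pvBany_step hmn, pvClean_take_false (fun i _ => hnocc i), Bool.false_or]
          apply (ih (s.drop (mn+1)) (by rw [List.length_drop]; omega)).1
          rw [PySem.Chars.find_eq_neg_one_iff]
          intro hinf
          obtain ⟨j, hj⟩ := pvInfix_iff.mp hinf
          rw [List.drop_drop] at hj
          exact hnocc _ hj
        · exact pvBany_noSep heq.symm
    · intro fn hf
      obtain ⟨hpre, hminf⟩ := pvFindSpecNat hf
      have hslen : fn + 12 ≤ s.length := by
        have := hpre.length_le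
        rw [List.length_drop, pvPatLen] at this
        -- need fn ≤ s.length too: if fn > length, drop = [] and pvPat <+: [] is false
        by_cases hfl : fn ≤ s.length
        · omega
        · exfalso
          rw [List.drop_eq_nil_of_le (by omega)] at hpre
          have := hpre.length_le
          rw [pvPatLen] at this
          simp at this
      constructor
      · -- no close after fn
        intro hc
        rcases hm0 : PySem.Chars.find s [')'] with _
        have hge := PySem.Chars.neg_one_le_find s [')']
        rcases Int.le_iff_lt_or_eq.mp hge with hlt | heq
        · have h0 : 0 ≤ PySem.Chars.find s [')'] := by omega
          obtain ⟨mn, hmn⟩ := Int.eq_ofNat_of_zero_le h0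
          obtain ⟨hmp, hmm⟩ := pvFindSpecNat hmn
          have hmf : mn < fn := by
            by_contra hge2
            push_neg at hge2
            apply (PySem.Chars.find_eq_neg_one_iff _ _).mp hc
            apply pvInfix_iff.mpr ⟨mn - fn, ?_⟩
            rw [List.drop_drop, show fn + (mn - fn) = mn from by omega]
            exact hmp
          rw [pvBany_step hmn, pvClean_take_false (fun i hi => hminf i (by omega)),
            Bool.false_or]
          have hf' : PySem.Chars.find (s.drop (mn+1)) pvPat = ((fn - (mn+1) : Nat) : Int) :=
            pvFindDrop hf (by omega)
          refine ((ih (s.drop (mn+1)) (by rw [List.length_drop]; omega)).2 _ hf').1 ?_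
          rw [List.drop_drop, show (mn+1) + (fn - (mn+1)) = fn from by omega]
          exact hc
        · exact pvBany_noSep heq.symm
      · intro cn hc
        obtain ⟨hcp, hcm⟩ := pvFindSpecNat hc
        -- s has a ')' (at fn + cn), so find s ')' = some mn
        have hinf : [')'] <:+: s := by
          apply pvInfix_iff.mpr ⟨fn + cn, ?_⟩
          rw [← List.drop_drop]
          exact hcp
        have hne : PySem.Chars.find s [')'] ≠ -1 := by
          rw [Ne, PySem.Chars.find_eq_neg_one_iff]
          intro h; exact h hinf
        have hge := PySem.Chars.neg_one_le_find s [')']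
        obtain ⟨mn, hmn⟩ := Int.eq_ofNat_of_zero_le (by omega : 0 ≤ PySem.Chars.find s [')'])
        obtain ⟨hmp, hmm⟩ := pvFindSpecNat hmn
        rcases Nat.lt_or_ge mn fn with hmf | hmf
        · -- peel a ')' before the occurrence
          have hf' : PySem.Chars.find (s.drop (mn+1)) pvPat = ((fn - (mn+1) : Nat) : Int) :=
            pvFindDrop hf (by omega)
          have hdropeq : (s.drop (mn+1)).drop (fn - (mn+1)) = s.drop fn := by
            rw [List.drop_drop, show (mn+1) + (fn - (mn+1)) = fn from by omega]
          have hc' : PySem.Chars.find ((s.drop (mn+1)).drop (fn - (mn+1))) [')'] = (cn:Int) := by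
            rw [hdropeq]; exact hc
          have hstep := pvBany_step hmn
          have hcl := pvClean_take_false (fun i hi => hminf i (by omega)) (s := s) (m := mn)
          have hrec := ((ih (s.drop (mn+1)) (by rw [List.length_drop]; omega)).2 _ hf').2 cn hc'
          constructor
          · intro hseg
            rw [hstep, hcl, Bool.false_or]
            exact (hrec.1 (by rw [hdropeq]; exact hseg))
          · intro hseg
            rw [hstep, hcl, Bool.false_or]
            rw [hrec.2 (by rw [hdropeq]; exact hseg)]
            rw [List.drop_drop, show (mn+1) + (fn - (mn+1) + cn) = fn + cn from by omega]
        · -- first ')' is the closing one: mn = fn + cn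
          have hmeq : mn = fn + cn := by
            have h1 : mn ≤ fn + cn := by
              by_contra hgt
              push_neg at hgt
              apply hmm (fn + cn) hgt
              rw [← List.drop_drop]
              exact hcp
            have h2 : fn + cn ≤ mn := by
              by_contra hgt
              push_neg at hgt
              apply hcm (mn - fn) (by omega)
              rw [List.drop_drop, show fn + (mn - fn) = mn from by omega]
              exact hmp
            omega
          subst hmeq
          have hcl := pvClean_at_occ hpre hminf hc
          have hsep := pvSep_at hmn
          constructor
          · intro hseg
            rw [pvBany_step hmn, hcl, hseg, Bool.true_or]
          · intro hseg
            rw [pvBany_step hmn, hcl, hseg, Bool.false_or, hsep, pvBany_cons_sep]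

-- A-side loop matches pvBany
theorem pvALoop_eq : ∀ (fuel : Nat) (low : List Char) (i : Nat), i ≤ low.length →
    low.length - i < fuel → pvALoop low i fuel = pvBany (low.drop i) := by
  intro fuel
  induction fuel with
  | zero => intro low i _ h; omega
  | succ fuel ih =>
    intro low i hi hfu
    have hB := pvBmain (low.drop i).length (low.drop i) le_rfl
    rw [pvALoop]
    by_cases hfneg : PySem.Chars.find (low.drop i) pvPat = -1
    · have hF : PySem.Chars.findFrom low pvPat (i:Int) = -1 := by
        rw [PySem.Chars.findFrom_natCast low pvPat i hi, if_pos hfneg]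
      simp only [hF, if_true]
      exact (hB.1 hfneg).symm
    · have hge0 : 0 ≤ PySem.Chars.find (low.drop i) pvPat := by
        have := PySem.Chars.neg_one_le_find (low.drop i) pvPat; omega
      obtain ⟨fn, hfn⟩ := Int.eq_ofNat_of_zero_le hge0
      obtain ⟨hpre, hminf⟩ := pvFindSpecNat hfn
      have hfn12 : fn + 12 ≤ (low.drop i).length := by
        have hl := hpre.length_le
        rw [List.length_drop, pvPatLen] at hl
        by_cases hfl : fn ≤ (low.drop i).length
        · omega
        · exfalso
          rw [List.drop_eq_nil_of_le (by omega)] at hpre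
          have := hpre.length_le
          rw [pvPatLen] at this
          simp at this
      have hile : i + fn ≤ low.length := by
        rw [List.length_drop] at hfn12; omega
      have hF : PySem.Chars.findFrom low pvPat (i:Int) = ((i + fn : Nat) : Int) := by
        rw [PySem.Chars.findFrom_natCast low pvPat i hi, if_neg (by rw [hfn]; omega), hfn]
        push_cast; ring
      simp only [hF]
      rw [if_neg (by omega)]
      have hdd : low.drop (i + fn) = (low.drop i).drop fn := (List.drop_drop).symm
      by_cases hcneg : PySem.Chars.find ((low.drop i).drop fn) [')'] = -1
      · have hC : PySem.Chars.findFrom low [')'] ((i + fn : Nat) : Int) = -1 := by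
          rw [PySem.Chars.findFrom_natCast low [')'] (i + fn) hile, if_pos (by rw [hdd]; exact hcneg)]
        simp only [hC, if_true]
        exact ((hB.2 fn hfn).1 hcneg).symm
      · have hgc0 : 0 ≤ PySem.Chars.find ((low.drop i).drop fn) [')'] := by
          have := PySem.Chars.neg_one_le_find ((low.drop i).drop fn) [')']; omega
        obtain ⟨cn, hcn⟩ := Int.eq_ofNat_of_zero_le hgc0
        obtain ⟨hcp, _⟩ := pvFindSpecNat hcn
        have hcn1 : 1 ≤ cn := by
          by_contra h0
          push_neg at h0
          interval_cases cn
          have h1 : ((low.drop i).drop fn)[0]? = some ')' := by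
            have h2 := pvSingle.mp (by simpa using hcp)
            simpa using h2
          obtain ⟨r, hr⟩ := hpre
          have hpat : pvPat = '(' :: "compatible;".toList := by decide
          rw [← hr, hpat] at h1
          simp at h1
        have hclose_lt : i + fn + cn < low.length := by
          have h3 := hcp.length_le
          rw [List.drop_drop, List.length_drop] at h3
          simp only [List.length_singleton] at h3
          rw [List.length_drop] at h3
          omega
        have hC : PySem.Chars.findFrom low [')'] ((i + fn : Nat) : Int)
            = ((i + fn + cn : Nat) : Int) := by
          rw [PySem.Chars.findFrom_natCast low [')'] (i + fn) hile,
            if_neg (by rw [hdd, hcn]; omega), hdd, hcn]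
          push_cast; ring
        simp only [hC]
        rw [if_neg (by omega)]
        have hslice : PySem.Chars.slice low (some ((i + fn : Nat) : Int))
            (some (((i + fn + cn : Nat) : Int) + 1)) = ((low.drop i).drop fn).take (cn + 1) := by
          have hcast : (((i + fn + cn : Nat) : Int) + 1)
              = ((i + fn : Nat) : Int) + ((cn + 1 : Nat) : Int) := by push_cast; ring
          rw [hcast, PySem.Chars.slice_eq_listSlice, PySem.List.slice_natCast_add, List.drop_drop]
        rw [hslice]
        rcases hseg : pvCleanSeg (((low.drop i).drop fn).take (cn + 1)) with _ | _
        · rw [show (!(pvRejects.any fun r =>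
              PySem.Chars.isIn r (((low.drop i).drop fn).take (cn + 1)))) = false from hseg]
          rw [if_neg (by simp)]
          rw [show ((( i + fn + cn : Nat) : Int)).toNat = i + fn + cn from by omega]
          rw [ih low (i + fn + cn) (by omega) (by omega)]
          rw [((hB.2 fn hfn).2 cn hcn).2 hseg, List.drop_drop,
            show i + (fn + cn) = i + fn + cn from by omega]
        · rw [show (!(pvRejects.any fun r =>
              PySem.Chars.isIn r (((low.drop i).drop fn).take (cn + 1)))) = true from hseg]
          rw [if_pos rfl]
          exact (((hB.2 fn hfn).2 cn hcn).1 hseg).symm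

-- ===== VERDICT (by name: the statement is the Claim_ definition above) =====
theorem bare_compat_py_spec : Claim_equal_bare_compat_py := by
  intro ua _
  show bare_compat_py ua = bare_compat_py_alt ua
  rw [bare_compat_py, bare_compat_py_alt]
  rw [pvALoop_eq (((PySem.Chars.lower ua.toList)).length + 1) _ 0 (by omega) (by omega)]
  rw [List.drop_zero, pvSplitOn_eq, PySem.List.slice_to_neg_one]
  rfl
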